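-- pv_equiv track=rewrite | github.com/JMS-tesoy/EASync | backend/app/services/otp_service.py | verify_backup_code
-- ===== SOURCE A (Python) =====
-- from typing import Tuple, List, Optional
--
-- def verify_backup_code(stored_codes: List[str], provided_code: str) -> Tuple[bool, List[str]]:
--     """
--     Verify a backup code and return updated list with the used code removed.
--
--     Args:
--         stored_codes: List of remaining backup codes
--         provided_code: The code provided by the user
--
--     Returns:
--         Tuple of (is_valid, updated_codes_list)
--     """
--     # Normalize the code (remove dashes, uppercase)
--     normalized = provided_code.replace("-", "").upper()
--
--     for i, code in enumerate(stored_codes):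
--         stored_normalized = code.replace("-", "").upper()
--         if normalized == stored_normalized:
--             # Remove the used code
--             updated = stored_codes[:i] + stored_codes[i+1:]
--             return True, updated
--
--     return False, stored_codes
-- ===== SOURCE B (Python) =====
-- from typing import Tuple, List
--
-- def verify_backup_code(stored_codes: List[str], provided_code: str) -> Tuple[bool, List[str]]:
--     """Verify a backup code; on success return the list with the first match removed."""
--     normalized = provided_code.replace("-", "").upper()
--     found = False
--     updated = []
--     for code in stored_codes:
--         if not found and code.replace("-", "").upper() == normalized:
--             found = True
--             continue
--         updated.append(code)
--     return (True, updated) if found else (False, stored_codes)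
-- ===== Notes on version B (the rewrite author's own statement) =====
-- stated objective: alternative
-- what changed: Replaces the enumerate-index scan plus two slices with a single accumulator pass that builds the updated list incrementally, skipping the first match via a found flag.
import Mathlib
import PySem

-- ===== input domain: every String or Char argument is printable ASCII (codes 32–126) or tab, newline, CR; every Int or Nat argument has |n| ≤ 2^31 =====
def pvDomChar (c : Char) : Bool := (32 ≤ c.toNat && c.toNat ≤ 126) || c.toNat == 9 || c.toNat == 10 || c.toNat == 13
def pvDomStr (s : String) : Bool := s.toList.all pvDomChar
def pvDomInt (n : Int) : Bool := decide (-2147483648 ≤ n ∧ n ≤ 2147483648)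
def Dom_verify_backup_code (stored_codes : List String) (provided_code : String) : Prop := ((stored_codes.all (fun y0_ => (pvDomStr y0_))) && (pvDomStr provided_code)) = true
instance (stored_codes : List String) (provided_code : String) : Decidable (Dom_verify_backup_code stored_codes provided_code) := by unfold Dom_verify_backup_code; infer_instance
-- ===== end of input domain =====

-- B replaces A's enumerate-index scan plus two slices by a single accumulator pass
-- with a found flag (objective: alternative decomposition, same cost).

-- shared normalization: code.replace("-", "").upper()
def pvNormalize (s : String) : String := PySem.Str.upper (PySem.Str.replace s "-" "")

-- ===== PORT A =====
-- the 'for i, code in enumerate(stored_codes)' loop of A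
def vbcLoopA (full : List String) (normalized : String) : List (Int × String) → Bool × List String
  | [] => (false, full)
  | (i, code) :: rest =>
    let stored_normalized := pvNormalize code
    if normalized == stored_normalized then
      (true, PySem.List.slice full none (some i) ++ PySem.List.slice full (some (i + 1)) none)
    else vbcLoopA full normalized rest

def verify_backup_code (stored_codes : List String) (provided_code : String) : Bool × List String :=
  let normalized := pvNormalize provided_code
  vbcLoopA stored_codes normalized (PySem.List.enumerate stored_codes)

-- ===== PORT B =====
-- one step of B's accumulator loop over (found, updated)
def vbcStepB (normalized : String) (acc : Bool × List String) (code : String) : Bool × List String :=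
  if !acc.1 && (pvNormalize code == normalized) then (true, acc.2)
  else (acc.1, acc.2 ++ [code])

def verify_backup_code_alt (stored_codes : List String) (provided_code : String) : Bool × List String :=
  let normalized := pvNormalize provided_code
  let r := stored_codes.foldl (vbcStepB normalized) (false, [])
  if r.1 then (true, r.2) else (false, stored_codes)

-- ===== PRECONDITION & SPEC =====
def Spec_verify_backup_code (stored_codes : List String) (provided_code : String) (out : Bool × List String) : Prop := out = verify_backup_code_alt stored_codes provided_code
instance (stored_codes : List String) (provided_code : String) (out : Bool × List String) : Decidable (Spec_verify_backup_code stored_codes provided_code out) := by unfold Spec_verify_backup_code; infer_instance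

-- ===== CLAIM (what is proved, stated in full; the proofs are below) =====
def Claim_equal_verify_backup_code : Prop := ∀ (stored_codes : List String) (provided_code : String), Dom_verify_backup_code stored_codes provided_code → Spec_verify_backup_code stored_codes provided_code (verify_backup_code stored_codes provided_code)

-- ===== LEMMAS AND PROOFS =====

-- common characterisation: remove the first code normalizing to n, none if absent
def pvFirstRemove (n : String) : List String → Option (List String)
  | [] => none
  | x :: r => if pvNormalize x = n then some r else (pvFirstRemove n r).map (x :: ·)

theorem vbcLoopA_eq (n : String) : ∀ (suf pre : List String),
    vbcLoopA (pre ++ suf) n (PySem.List.enumerate suf (pre.length : Int)) =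
      (match pvFirstRemove n suf with
       | none => (false, pre ++ suf)
       | some r => (true, pre ++ r)) := by
  intro suf
  induction suf with
  | nil => intro pre; simp [vbcLoopA, pvFirstRemove, PySem.List.enumerate_nil]
  | cons x suf ih =>
    intro pre
    rw [PySem.List.enumerate_cons]
    by_cases h : pvNormalize x = n
    · simp only [vbcLoopA, pvFirstRemove, h, beq_iff_eq, if_true]
      rw [PySem.List.slice_to_natCast]
      have : ((pre.length : Int) + 1) = ((pre.length + 1 : Nat) : Int) := by push_cast; ring
      rw [this, PySem.List.slice_from_natCast]
      have htake : (pre ++ x :: suf).take pre.length = pre := List.take_left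
      have hdrop : (pre ++ x :: suf).drop (pre.length + 1) = suf := by
        have : pre ++ x :: suf = (pre ++ [x]) ++ suf := by simp
        rw [this]
        have hl : (pre ++ [x]).length = pre.length + 1 := by simp
        rw [← hl]; exact List.drop_left
      rw [htake, hdrop]
    · have hcond : (n == pvNormalize x) = false := by
        simp only [beq_eq_false_iff_ne, ne_eq]; exact fun he => h he.symm
      simp only [vbcLoopA, hcond, Bool.false_eq_true, if_false]
      have : ((pre.length : Int) + 1) = (((pre ++ [x]).length : Nat) : Int) := by simp
      rw [this]
      have := ih (pre ++ [x])
      simp only [List.append_assoc, List.singleton_append] at this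
      rw [this]
      simp only [pvFirstRemove, if_neg h]
      cases hr : pvFirstRemove n suf with
      | none => simp
      | some r => simp

theorem vbcFoldB_found (n : String) : ∀ (l : List String) (acc : List String),
    l.foldl (vbcStepB n) (true, acc) = (true, acc ++ l) := by
  intro l
  induction l with
  | nil => intro acc; simp
  | cons x l ih => intro acc; simp [vbcStepB, List.foldl_cons, ih]

theorem vbcFoldB_eq (n : String) : ∀ (l : List String) (acc : List String),
    l.foldl (vbcStepB n) (false, acc) =
      (match pvFirstRemove n l with
       | none => (false, acc ++ l)
       | some r => (true, acc ++ r)) := by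
  intro l
  induction l with
  | nil => intro acc; simp [pvFirstRemove]
  | cons x l ih =>
    intro acc
    by_cases h : pvNormalize x = n
    · simp only [List.foldl_cons, vbcStepB, h, Bool.not_false, beq_self_eq_true,
        Bool.true_and, if_true, pvFirstRemove]
      exact vbcFoldB_found n l acc
    · have hcond : (pvNormalize x == n) = false := by simp only [beq_eq_false_iff_ne, ne_eq]; exact h
      simp only [List.foldl_cons, vbcStepB, hcond, Bool.not_false, Bool.true_and,
        Bool.false_eq_true, if_false]
      rw [ih (acc ++ [x])]
      simp only [pvFirstRemove, if_neg h]
      cases hr : pvFirstRemove n l with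
      | none => simp
      | some r => simp

-- ===== VERDICT (by name: the statement is the Claim_ definition above) =====
theorem verify_backup_code_spec : Claim_equal_verify_backup_code := by
  intro stored provided _
  unfold Spec_verify_backup_code verify_backup_code verify_backup_code_alt
  have hA := vbcLoopA_eq (pvNormalize provided) stored []
  simp only [List.nil_append, List.length_nil, Nat.cast_zero] at hA
  rw [hA]
  show _ = (let r := stored.foldl (vbcStepB (pvNormalize provided)) (false, []); if r.1 then (true, r.2) else (false, stored))
  rw [vbcFoldB_eq (pvNormalize provided) stored []]
  cases hr : pvFirstRemove (pvNormalize provided) stored with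
  | none => simp
  | some r => simp
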